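-- pv_equiv track=rewrite | github.com/sherlockdev6/adsim-lab | packages/sim/src/adsim/matching.py | get_synonyms
-- ===== SOURCE A (Python) =====
-- SYNONYMS = {
--     "buy": ["purchase", "get", "acquire", "order"],
--     "cheap": ["affordable", "low cost", "budget", "inexpensive"],
--     "best": ["top", "premier", "leading", "excellent"],
--     "near": ["nearby", "close to", "around", "local"],
--     "rent": ["lease", "hire", "rental"],
--     "apartment": ["flat", "unit", "condo"],
--     "villa": ["house", "home", "property"],
--     "service": ["services", "help", "assistance"],
--     "repair": ["fix", "fixing", "maintenance"],
--     "cleaning": ["clean", "cleaner", "housekeeping"],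
--     "ac": ["air conditioning", "air conditioner", "hvac"],
--     "plumber": ["plumbing", "plumbers"],
--     "electrician": ["electrical", "electric"],
--     "dubai": ["dxb"],
--     "abu dhabi": ["abudhabi", "ad"],
--     "uae": ["emirates", "united arab emirates"],
--     "price": ["cost", "pricing", "rate", "rates"],
--     "discount": ["sale", "offer", "deal", "deals"],
--     "shop": ["store", "shopping", "buy"],
--     "delivery": ["shipping", "deliver"],
--     "online": ["web", "internet", "digital"],
-- }
--
-- def get_synonyms(word: str) -> set[str]:
--     """Get synonyms for a word."""
--     synonyms = {word}
--     # Check if word is a key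
--     if word in SYNONYMS:
--         synonyms.update(SYNONYMS[word])
--     # Check if word is in any synonym list
--     for key, syn_list in SYNONYMS.items():
--         if word in syn_list:
--             synonyms.add(key)
--             synonyms.update(syn_list)
--     return synonyms
-- ===== SOURCE B (Python) =====
-- # Same synonym data, re-encoded as packed group strings; a reverse index is
-- # expanded from them once at module load, so each call is one dict lookup.
-- _GROUPS = [
--     "buy|purchase|get|acquire|order",
--     "cheap|affordable|low cost|budget|inexpensive",
--     "best|top|premier|leading|excellent",
--     "near|nearby|close to|around|local",
--     "rent|lease|hire|rental",
--     "apartment|flat|unit|condo",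
--     "villa|house|home|property",
--     "service|services|help|assistance",
--     "repair|fix|fixing|maintenance",
--     "cleaning|clean|cleaner|housekeeping",
--     "ac|air conditioning|air conditioner|hvac",
--     "plumber|plumbing|plumbers",
--     "electrician|electrical|electric",
--     "dubai|dxb",
--     "abu dhabi|abudhabi|ad",
--     "uae|emirates|united arab emirates",
--     "price|cost|pricing|rate|rates",
--     "discount|sale|offer|deal|deals",
--     "shop|store|shopping|buy",
--     "delivery|shipping|deliver",
--     "online|web|internet|digital",
-- ]
--
-- _INDEX = {}
-- for _g in _GROUPS:
--     _toks = _g.split("|")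
--     for _t in _toks:
--         _INDEX.setdefault(_t, {_t}).update(_toks)
--
--
-- def get_synonyms(word: str) -> set[str]:
--     """Get synonyms for a word."""
--     hit = _INDEX.get(word)
--     return set(hit) if hit is not None else {word}
-- ===== Notes on version B (the rewrite author's own statement) =====
-- stated objective: alternative
-- what changed: Replaces A's per-call scan over every SYNONYMS entry with a reverse index expanded once at module load from packed delimiter-joined group strings, so each call is a single dict lookup copied to a fresh set.
import Mathlib
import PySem

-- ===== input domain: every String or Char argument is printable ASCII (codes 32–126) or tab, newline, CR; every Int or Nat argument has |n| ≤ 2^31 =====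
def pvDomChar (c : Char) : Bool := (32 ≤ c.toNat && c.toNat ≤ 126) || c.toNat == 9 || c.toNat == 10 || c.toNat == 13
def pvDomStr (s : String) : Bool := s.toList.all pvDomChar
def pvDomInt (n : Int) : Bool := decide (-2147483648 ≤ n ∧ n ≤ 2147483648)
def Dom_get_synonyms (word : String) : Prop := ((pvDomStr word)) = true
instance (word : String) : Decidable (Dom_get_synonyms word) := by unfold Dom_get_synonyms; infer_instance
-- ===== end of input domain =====

-- B re-encodes the synonym data as packed group strings and expands them once at module
-- load into a reverse index, so each call is a single dictionary lookup (objective: alternative).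

-- ===== PORT A =====
-- A's module constant SYNONYMS
def pvSYNONYMS : PySem.Dict String (List String) := PySem.Dict.ofList
  [ ("buy", ["purchase", "get", "acquire", "order"]),
    ("cheap", ["affordable", "low cost", "budget", "inexpensive"]),
    ("best", ["top", "premier", "leading", "excellent"]),
    ("near", ["nearby", "close to", "around", "local"]),
    ("rent", ["lease", "hire", "rental"]),
    ("apartment", ["flat", "unit", "condo"]),
    ("villa", ["house", "home", "property"]),
    ("service", ["services", "help", "assistance"]),
    ("repair", ["fix", "fixing", "maintenance"]),
    ("cleaning", ["clean", "cleaner", "housekeeping"]),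
    ("ac", ["air conditioning", "air conditioner", "hvac"]),
    ("plumber", ["plumbing", "plumbers"]),
    ("electrician", ["electrical", "electric"]),
    ("dubai", ["dxb"]),
    ("abu dhabi", ["abudhabi", "ad"]),
    ("uae", ["emirates", "united arab emirates"]),
    ("price", ["cost", "pricing", "rate", "rates"]),
    ("discount", ["sale", "offer", "deal", "deals"]),
    ("shop", ["store", "shopping", "buy"]),
    ("delivery", ["shipping", "deliver"]),
    ("online", ["web", "internet", "digital"]) ]

def get_synonyms (word : String) : List String :=
  let synonyms : PySem.Set String := PySem.Set.ofList [word]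
  let synonyms := if pvSYNONYMS.contains word
    then PySem.Set.update synonyms (pvSYNONYMS.getD word [])
    else synonyms
  pvSYNONYMS.items.foldl
    (fun s p => if word ∈ p.2 then PySem.Set.update (PySem.Set.add s p.1) p.2 else s)
    synonyms

-- ===== PORT B =====
-- B's module constant: the same data as packed group strings
def pvGROUPS : List String :=
  [ "buy|purchase|get|acquire|order",
    "cheap|affordable|low cost|budget|inexpensive",
    "best|top|premier|leading|excellent",
    "near|nearby|close to|around|local",
    "rent|lease|hire|rental",
    "apartment|flat|unit|condo",
    "villa|house|home|property",
    "service|services|help|assistance",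
    "repair|fix|fixing|maintenance",
    "cleaning|clean|cleaner|housekeeping",
    "ac|air conditioning|air conditioner|hvac",
    "plumber|plumbing|plumbers",
    "electrician|electrical|electric",
    "dubai|dxb",
    "abu dhabi|abudhabi|ad",
    "uae|emirates|united arab emirates",
    "price|cost|pricing|rate|rates",
    "discount|sale|offer|deal|deals",
    "shop|store|shopping|buy",
    "delivery|shipping|deliver",
    "online|web|internet|digital" ]

-- the reverse index built once at module load (Source B's build loop, step for step)
def pvINDEX : PySem.Dict String (PySem.Set String) :=
  pvGROUPS.foldl
    (fun d g =>
      -- g.split("|"): sep is a non-empty literal, so split? is always some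
      let toks := (PySem.Str.split? g "|").getD []
      toks.foldl
        (fun d t =>
          (d.setdefault t (PySem.Set.ofList [t])).modify t PySem.Set.empty
            (fun s => PySem.Set.update s toks))
        d)
    PySem.Dict.empty

def get_synonyms_alt (word : String) : List String :=
  match pvINDEX.get? word with
  | some hit => hit
  | none => [word]

-- ===== PRECONDITION & SPEC =====
def Spec_get_synonyms (word : String) (out : List String) : Prop := out = get_synonyms_alt word
instance (word : String) (out : List String) : Decidable (Spec_get_synonyms word out) := by unfold Spec_get_synonyms; infer_instance

-- ===== CLAIM (what is proved, stated in full; the proofs are below) =====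
def Claim_equal_get_synonyms : Prop := ∀ (word : String), Dom_get_synonyms word → Spec_get_synonyms word (get_synonyms word)

-- ===== LEMMAS AND PROOFS =====

-- all tokens mentioned anywhere in SYNONYMS (keys and list entries)
def pvTOK : List String := pvSYNONYMS.items.flatMap (fun p => p.1 :: p.2)

-- on every mentioned token the two ports agree (finite check)
set_option maxRecDepth 100000 in
theorem pv_hit : ∀ w ∈ pvTOK, get_synonyms w = get_synonyms_alt w := by decide

-- every key of the reverse index is a mentioned token (finite check)
set_option maxRecDepth 100000 in
theorem pv_index_keys_sub : ∀ k ∈ pvINDEX.keys, k ∈ pvTOK := by decide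

theorem pv_miss (word : String) (hw : word ∉ pvTOK) : get_synonyms word = get_synonyms_alt word := by
  have hkeys : word ∉ pvSYNONYMS.keys := by
    intro hk
    exact hw (by
      simp only [pvTOK, List.mem_flatMap]
      rcases List.mem_map.mp hk with ⟨p, hp, hpe⟩
      exact ⟨p, hp, by simp [hpe]⟩)
  have hcon : pvSYNONYMS.contains word = false := by
    rw [PySem.Dict.contains_eq_decide_mem_keys]
    simp [hkeys]
  have hcong : ∀ (acc : PySem.Set String) (p : String × List String), p ∈ pvSYNONYMS.items →
      (fun (s : PySem.Set String) (p : String × List String) =>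
        if word ∈ p.2 then PySem.Set.update (PySem.Set.add s p.1) p.2 else s) acc p
      = (fun acc _ => acc) acc p := by
    intro acc p hp
    have hwp : word ∉ p.2 := fun hin =>
      hw (by
        simp only [pvTOK, List.mem_flatMap]
        exact ⟨p, hp, List.mem_cons_of_mem _ hin⟩)
    simp [hwp]
  have hA : get_synonyms word = [word] := by
    unfold get_synonyms
    simp only [hcon, Bool.false_eq_true, if_false]
    rw [PySem.List.foldl_congr_mem _ _ _ _ hcong, PySem.List.foldl_ignore]
    rfl
  have hB : get_synonyms_alt word = [word] := by
    unfold get_synonyms_alt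
    have : pvINDEX.get? word = none := by
      rw [PySem.Dict.get?_eq_none_iff_not_mem_keys]
      exact fun hk => hw (pv_index_keys_sub word hk)
    rw [this]
  rw [hA, hB]

-- ===== VERDICT (by name: the statement is the Claim_ definition above) =====
set_option maxRecDepth 100000 in
theorem get_synonyms_spec : Claim_equal_get_synonyms := by
  intro word _
  unfold Spec_get_synonyms
  by_cases h : word ∈ pvTOK
  · exact pv_hit word h
  · exact pv_miss word h
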